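-- pv_equiv track=rewrite | github.com/turkish-nlp-suite/Turkish-subwords-research | benchmarking/pre-transformer/char-level/pos-dep-morph/train_pos_dep_morph.py | tokens_to_char_stream
-- ===== SOURCE A (Python) =====
-- from typing import List, Dict, Tuple
--
-- def tokens_to_char_stream(tokens: List[str], sep=" ") -> Tuple[List[str], List[Tuple[int,int]]]:
--     chars = []
--     spans = []
--     cur = 0
--     for i, tok in enumerate(tokens):
--         start = cur
--         for c in tok:
--             chars.append(c)
--             cur += 1
--         end = cur
--         spans.append((start, end))
--         if i != len(tokens) - 1:
--             chars.append(sep)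
--             cur += 1
--     return chars, spans
-- ===== SOURCE B (Python) =====
-- from typing import List, Tuple
--
-- def tokens_to_char_stream(tokens: List[str], sep=" ") -> Tuple[List[str], List[Tuple[int,int]]]:
--     # Pass 1: spans from token lengths and a running offset.
--     spans = []
--     cur = 0
--     for tok in tokens:
--         spans.append((cur, cur + len(tok)))
--         cur += len(tok) + 1
--     # Pass 2: chars = first token's chars, then (sep + chars) for each later token.
--     chars = []
--     if tokens:
--         chars.extend(tokens[0])
--         for tok in tokens[1:]:
--             chars.append(sep)
--             chars.extend(tok)
--     return chars, spans
-- ===== Notes on version B (the rewrite author's own statement) =====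
-- stated objective: simpler
-- what changed: Replaces A's single interleaved loop (per-character counter, index test for the last token) by two independent passes: spans computed from token lengths with a running offset, then the char list assembled with sep between tokens.
import Mathlib
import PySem

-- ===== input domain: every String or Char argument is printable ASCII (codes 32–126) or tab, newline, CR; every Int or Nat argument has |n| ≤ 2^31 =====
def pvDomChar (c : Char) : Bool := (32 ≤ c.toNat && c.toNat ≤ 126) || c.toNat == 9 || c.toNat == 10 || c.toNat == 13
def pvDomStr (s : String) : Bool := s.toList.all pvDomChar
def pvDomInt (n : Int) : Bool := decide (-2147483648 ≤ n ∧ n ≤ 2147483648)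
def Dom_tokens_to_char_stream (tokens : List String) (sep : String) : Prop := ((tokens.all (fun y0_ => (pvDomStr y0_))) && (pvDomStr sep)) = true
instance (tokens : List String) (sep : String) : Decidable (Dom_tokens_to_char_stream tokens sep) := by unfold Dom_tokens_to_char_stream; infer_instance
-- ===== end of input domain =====

-- B replaces A's single interleaved loop by two independent passes: spans from token lengths
-- and a running offset, then the char list built token-by-token with sep between tokens
-- (objective: simpler decomposition, same cost).

-- ===== PORT A =====
-- one iteration of A's `for i, tok in enumerate(tokens)` body; state = (chars, spans, cur)
def pvStepA (n : Int) (sep : String) (st : List String × List (Int × Int) × Int)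
    (p : Int × String) : List String × List (Int × Int) × Int :=
  let start := st.2.2
  let inner := p.2.toList.foldl
    (fun (cc : List String × Int) c => (cc.1 ++ [String.mk [c]], cc.2 + 1)) (st.1, st.2.2)
  let spans := st.2.1 ++ [(start, inner.2)]
  if p.1 ≠ n - 1 then (inner.1 ++ [sep], spans, inner.2 + 1) else (inner.1, spans, inner.2)

def tokens_to_char_stream (tokens : List String) (sep : String) :
    List String × (List (Int × Int)) :=
  let st := (PySem.List.enumerate tokens 0).foldl
    (pvStepA (tokens.length : Int) sep) ([], [], 0)
  (st.1, st.2.1)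

-- ===== PORT B =====
-- pass 1 of Source B: spans from lengths and a running offset
def pvSpansB : List String → Int → List (Int × Int)
  | [], _ => []
  | t :: ts, cur => (cur, cur + PySem.Str.len t) :: pvSpansB ts (cur + PySem.Str.len t + 1)

-- `chars.extend(tok)`: a token's characters as 1-char strings
def pvCharsOf (t : String) : List String := t.toList.map (fun c => String.mk [c])

def tokens_to_char_stream_alt (tokens : List String) (sep : String) :
    List String × (List (Int × Int)) :=
  let chars :=
    match tokens with
    | [] => []
    | t :: ts => ts.foldl (fun acc u => acc ++ (sep :: pvCharsOf u)) (pvCharsOf t)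
  (chars, pvSpansB tokens 0)

-- ===== PRECONDITION & SPEC =====
def Spec_tokens_to_char_stream (tokens : List String) (sep : String) (out : List String × (List (Int × Int))) : Prop := out = tokens_to_char_stream_alt tokens sep
instance (tokens : List String) (sep : String) (out : List String × (List (Int × Int))) : Decidable (Spec_tokens_to_char_stream tokens sep out) := by unfold Spec_tokens_to_char_stream; infer_instance

-- ===== CLAIM (what is proved, stated in full; the proofs are below) =====
def Claim_equal_tokens_to_char_stream : Prop := ∀ (tokens : List String) (sep : String), Dom_tokens_to_char_stream tokens sep → Spec_tokens_to_char_stream tokens sep (tokens_to_char_stream tokens sep)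

-- ===== LEMMAS AND PROOFS =====

-- A's result chars, characterized directly (sep after every token but the last)
def bChars (sep : String) : List String → List String
  | [] => []
  | [t] => pvCharsOf t
  | t :: ts => pvCharsOf t ++ [sep] ++ bChars sep ts

-- final value of cur after A's loop over the remaining tokens
def wEnd : List String → Int → Int
  | [], cur => cur
  | [t], cur => cur + PySem.Str.len t
  | t :: ts, cur => wEnd ts (cur + PySem.Str.len t + 1)

theorem innerA (l : List Char) (chars : List String) (cur : Int) :
    l.foldl (fun (cc : List String × Int) c => (cc.1 ++ [String.mk [c]], cc.2 + 1)) (chars, cur)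
      = (chars ++ l.map (fun c => String.mk [c]), cur + l.length) := by
  induction l generalizing chars cur with
  | nil => simp
  | cons c l ih =>
    simp [List.foldl, ih, List.append_assoc]
    omega

theorem loopA (n : Int) (sep : String) :
    ∀ (ts : List String) (s : Int) (chars : List String) (spans : List (Int × Int)) (cur : Int),
      ts ≠ [] → s + (ts.length : Int) = n →
      (PySem.List.enumerate ts s).foldl (pvStepA n sep) (chars, spans, cur)
        = (chars ++ bChars sep ts, spans ++ pvSpansB ts cur, wEnd ts cur) := by
  intro ts
  induction ts with
  | nil => intro s chars spans cur h; exact absurd rfl h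
  | cons t rest ih =>
    intro s chars spans cur _ hn
    cases rest with
    | nil =>
      have hs : s = n - 1 := by simp at hn; omega
      simp [PySem.List.enumerate_cons, PySem.List.enumerate_nil, List.foldl,
            pvStepA, innerA, hs, bChars, pvSpansB, wEnd, pvCharsOf, PySem.Str.len]
    | cons u us =>
      have hs : s ≠ n - 1 := by simp at hn ⊢; omega
      have hrec := ih (s + 1) (chars ++ pvCharsOf t ++ [sep])
        (spans ++ [(cur, cur + (t.toList.length : Int))])
        (cur + (t.toList.length : Int) + 1) (by simp) (by simp at hn ⊢; omega)
      simp [PySem.List.enumerate_cons, List.foldl, pvStepA, innerA, hs, pvCharsOf] at hrec ⊢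
      rw [hrec]
      simp [bChars, pvSpansB, wEnd, PySem.Str.len]
      cases us <;> simp_all [bChars, List.append_assoc, pvCharsOf]

-- Source B's second-pass loop equals the flat "sep between tokens" characterization
theorem foldB (sep : String) (ts : List String) (acc : List String) :
    ts.foldl (fun acc u => acc ++ (sep :: pvCharsOf u)) acc
      = acc ++ ts.flatMap (fun u => sep :: pvCharsOf u) := by
  induction ts generalizing acc with
  | nil => simp
  | cons u us ih => simp [List.foldl, ih]

theorem bChars_eq (sep : String) (t : String) (ts : List String) :
    bChars sep (t :: ts) = pvCharsOf t ++ ts.flatMap (fun u => sep :: pvCharsOf u) := by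
  induction ts generalizing t with
  | nil => simp [bChars]
  | cons u us ih => simp [bChars, ih, List.append_assoc]

-- ===== VERDICT (by name: the statement is the Claim_ definition above) =====
theorem tokens_to_char_stream_spec : Claim_equal_tokens_to_char_stream := by
  intro tokens sep _
  unfold Spec_tokens_to_char_stream tokens_to_char_stream tokens_to_char_stream_alt
  cases tokens with
  | nil => simp [PySem.List.enumerate_nil, pvSpansB]
  | cons t ts =>
    rw [loopA ((t :: ts).length : Int) sep (t :: ts) 0 [] [] 0 (by simp) (by simp)]
    simp only [foldB, bChars_eq, List.nil_append]
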